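-- pv_equiv track=rewrite | github.com/buoren/vertaling | src/vertaling/utilities/locale.py | resolve_locale
-- ===== SOURCE A (Python) =====
-- def resolve_locale(
--     requested: str,
--     available: list[str],
--     default: str = "en",
-- ) -> str:
--     """Resolve a locale with fallback.
--
--     Tries in order:
--     1. Exact match (e.g. ``nl-NL``)
--     2. Language-only match (e.g. ``nl-NL`` matches ``nl``)
--     3. Reverse: language-only request matches a regional variant
--        (e.g. ``nl`` matches ``nl-NL``)
--     4. Default locale
--
--     Args:
--         requested: The requested locale code (e.g. 'nl-NL').
--         available: List of available locale codes.
--         default: Fallback locale if no match is found.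
--
--     Returns:
--         The best matching locale from ``available``, or ``default``.
--
--     Examples::
--
--         resolve_locale("nl-NL", ["nl", "en", "de"])  # → "nl"
--         resolve_locale("nl", ["nl-NL", "en-US"])      # → "nl-NL"
--         resolve_locale("fr-FR", ["en", "de"])          # → "en"
--     """
--     # Exact match
--     if requested in available:
--         return requested
--
--     # Language-only: nl-NL → nl
--     lang = requested.split("-")[0]
--     if lang in available:
--         return lang
--
--     # Reverse: nl → nl-NL (first regional variant wins)
--     for locale in available:
--         if locale.split("-")[0] == lang:
--             return locale
--
--     return default
-- ===== SOURCE B (Python) =====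
-- def resolve_locale(requested, available, default="en"):
--     """Single-pass rank scan: 3=exact, 2=language-only, 1=first regional variant."""
--     lang = requested.split("-")[0]
--     best_rank = 0
--     best = default
--     for locale in available:
--         if locale == requested:
--             rank = 3
--         elif locale == lang:
--             rank = 2
--         elif locale.split("-")[0] == lang:
--             rank = 1
--         else:
--             rank = 0
--         if best_rank < rank:
--             best_rank = rank
--             best = locale
--     return best
-- ===== Notes on version B (the rewrite author's own statement) =====
-- stated objective: alternative
-- what changed: Replaces A's three sequential scans (exact membership, language membership, variant loop) by one pass over available that keeps the best-ranked candidate (3=exact, 2=language, 1=first variant, strict improvement only).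
import Mathlib
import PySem

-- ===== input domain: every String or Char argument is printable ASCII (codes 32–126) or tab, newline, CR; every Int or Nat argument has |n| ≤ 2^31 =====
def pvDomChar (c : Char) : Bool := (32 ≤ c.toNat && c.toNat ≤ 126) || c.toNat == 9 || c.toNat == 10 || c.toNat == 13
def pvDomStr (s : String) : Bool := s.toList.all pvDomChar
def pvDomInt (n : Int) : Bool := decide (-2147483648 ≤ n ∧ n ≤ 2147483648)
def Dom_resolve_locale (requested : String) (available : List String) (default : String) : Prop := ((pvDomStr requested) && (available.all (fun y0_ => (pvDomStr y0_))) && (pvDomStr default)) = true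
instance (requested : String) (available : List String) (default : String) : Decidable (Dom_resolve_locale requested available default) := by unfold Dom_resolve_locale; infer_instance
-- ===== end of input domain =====

-- B replaces A's three sequential scans by one ranked pass over `available`; alternative decomposition, same cost.


-- ===== PORT A =====
-- s.split("-")[0]; split with a non-empty separator never returns [], so the [0] never raises (headD is exact here)
def pvFirstPart (s : String) : String := ((PySem.Str.split? s "-").getD []).headD ""

-- the 'for locale in available: if locale.split("-")[0] == lang: return locale' loop
def pvLoopA (lang : String) (default : String) : List String → String
  | [] => default
  | locale :: rest => if pvFirstPart locale == lang then locale else pvLoopA lang default rest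

def resolve_locale (requested : String) (available : List String) (default : String) : String :=
  if available.contains requested then requested
  else
    let lang := pvFirstPart requested
    if available.contains lang then lang
    else pvLoopA lang default available

-- ===== PORT B =====
-- single pass keeping (best_rank, best); strict '<' so the first candidate of a rank wins
def pvLoopB (requested lang : String) : List String → Nat → String → String
  | [], _, best => best
  | locale :: rest, bestRank, best =>
    let rank : Nat :=
      if locale == requested then 3
      else if locale == lang then 2
      else if pvFirstPart locale == lang then 1
      else 0
    if bestRank < rank then pvLoopB requested lang rest rank locale
    else pvLoopB requested lang rest bestRank best

def resolve_locale_alt (requested : String) (available : List String) (default : String) : String :=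
  pvLoopB requested (pvFirstPart requested) available 0 default

-- ===== PRECONDITION & SPEC =====
def Spec_resolve_locale (requested : String) (available : List String) (default : String) (out : String) : Prop := out = resolve_locale_alt requested available default
instance (requested : String) (available : List String) (default : String) (out : String) : Decidable (Spec_resolve_locale requested available default out) := by unfold Spec_resolve_locale; infer_instance

-- ===== CLAIM (what is proved, stated in full; the proofs are below) =====
def Claim_equal_resolve_locale : Prop := ∀ (requested : String) (available : List String) (default : String), Dom_resolve_locale requested available default → Spec_resolve_locale requested available default (resolve_locale requested available default)

-- ===== LEMMAS AND PROOFS =====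

-- once rank 3 is held nothing beats it
theorem pvLoopB_three (requested lang : String) (xs : List String) (best : String) :
    pvLoopB requested lang xs 3 best = best := by
  induction xs with
  | nil => rfl
  | cons l rest ih =>
      simp only [pvLoopB]
      split_ifs <;> first | exact ih | omega

-- with rank 2 held and no exact match ahead, the held value stays
theorem pvLoopB_two (requested lang : String) (xs : List String) (best : String)
    (h : requested ∉ xs) : pvLoopB requested lang xs 2 best = best := by
  induction xs with
  | nil => rfl
  | cons l rest ih =>
      simp only [List.mem_cons, not_or] at h
      have hl : (l == requested) = false := by simp [Ne.symm h.1]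
      simp only [pvLoopB, hl, Bool.false_eq_true, if_false]
      split_ifs <;> first | exact ih h.2 | omega

-- with rank 1 held and neither requested nor lang ahead, the held value stays
theorem pvLoopB_one (requested lang : String) (xs : List String) (best : String)
    (h1 : requested ∉ xs) (h2 : lang ∉ xs) : pvLoopB requested lang xs 1 best = best := by
  induction xs with
  | nil => rfl
  | cons l rest ih =>
      simp only [List.mem_cons, not_or] at h1 h2
      have hl : (l == requested) = false := by simp [Ne.symm h1.1]
      have hl2 : (l == lang) = false := by simp [Ne.symm h2.1]
      simp only [pvLoopB, hl, hl2, Bool.false_eq_true, if_false]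
      split_ifs <;> first | exact ih h1.2 h2.2 | omega

-- exact match present: B returns requested
theorem pvLoopB_exact (requested lang : String) (xs : List String) (bestRank : Nat) (best : String)
    (hmem : requested ∈ xs) (hr : bestRank ≤ 2) :
    pvLoopB requested lang xs bestRank best = requested := by
  induction xs generalizing bestRank best with
  | nil => cases hmem
  | cons l rest ih =>
      by_cases hl : l = requested
      · subst hl
        simp only [pvLoopB, beq_self_eq_true, if_true]
        rw [if_pos (by omega)]
        exact pvLoopB_three _ _ _ _
      · have hmem' : requested ∈ rest :=
          (List.mem_cons.mp hmem).resolve_left (fun h => hl h.symm)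
        have hlb : (l == requested) = false := by simp [hl]
        simp only [pvLoopB, hlb, Bool.false_eq_true, if_false]
        split_ifs <;> exact ih _ _ hmem' (by omega)

-- no exact match but language present: B returns lang
theorem pvLoopB_lang (requested lang : String) (xs : List String) (bestRank : Nat) (best : String)
    (hreq : requested ∉ xs) (hmem : lang ∈ xs) (hr : bestRank ≤ 1) :
    pvLoopB requested lang xs bestRank best = lang := by
  induction xs generalizing bestRank best with
  | nil => cases hmem
  | cons l rest ih =>
      simp only [List.mem_cons, not_or] at hreq
      have hlb : (l == requested) = false := by simp [Ne.symm hreq.1]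
      by_cases hl : l = lang
      · subst hl
        simp only [pvLoopB, hlb, Bool.false_eq_true, if_false, beq_self_eq_true, if_true]
        rw [if_pos (by omega)]
        exact pvLoopB_two _ _ _ _ hreq.2
      · have hmem' : lang ∈ rest :=
          (List.mem_cons.mp hmem).resolve_left (fun h => hl h.symm)
        have hlb2 : (l == lang) = false := by simp [hl]
        simp only [pvLoopB, hlb, hlb2, Bool.false_eq_true, if_false]
        split_ifs <;> exact ih _ _ hreq.2 hmem' (by omega)

-- neither requested nor lang present: B's pass coincides with A's variant loop
theorem pvLoopB_variant (requested lang : String) (xs : List String) (default : String)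
    (hreq : requested ∉ xs) (hlang : lang ∉ xs) :
    pvLoopB requested lang xs 0 default = pvLoopA lang default xs := by
  induction xs with
  | nil => rfl
  | cons l rest ih =>
      simp only [List.mem_cons, not_or] at hreq hlang
      have hlb : (l == requested) = false := by simp [Ne.symm hreq.1]
      have hlb2 : (l == lang) = false := by simp [Ne.symm hlang.1]
      by_cases hv : (pvFirstPart l == lang) = true
      · simp only [pvLoopB, pvLoopA, hlb, hlb2, hv, Bool.false_eq_true, if_false, if_true]
        rw [if_pos (by omega)]
        exact pvLoopB_one _ _ _ _ hreq.2 hlang.2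
      · simp only [pvLoopB, pvLoopA, hlb, hlb2, hv, Bool.false_eq_true, if_false]
        rw [if_neg (by omega)]
        exact ih hreq.2 hlang.2

-- ===== VERDICT (by name: the statement is the Claim_ definition above) =====
theorem resolve_locale_spec : Claim_equal_resolve_locale := by
  intro requested available default _
  unfold Spec_resolve_locale resolve_locale resolve_locale_alt
  by_cases h1 : requested ∈ available
  · simp [h1, pvLoopB_exact requested (pvFirstPart requested) available 0 default h1 (by omega)]
  · simp only [List.contains_eq_mem, h1, decide_false, Bool.false_eq_true, if_false]
    by_cases h2 : pvFirstPart requested ∈ available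
    · simp [h2, pvLoopB_lang requested (pvFirstPart requested) available 0 default h1 h2 (by omega)]
    · simp [h2, pvLoopB_variant requested (pvFirstPart requested) available default h1 h2]
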